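-- pv_equiv track=rewrite | github.com/myst-6/ukoly | public/assets/code/downpat/sol.py | is_pat
-- ===== SOURCE A (Python) =====
-- def is_pat(s):
--     if len(s) == 1:
--         return True
--     for i in range(1, len(s)):
--         left = s[:i]
--         right = s[i:]
--         if min(left) <= max(right):
--             continue
--
--         if is_pat(left[::-1]) and is_pat(right[::-1]):
--             return True
--     return False
-- ===== SOURCE B (Python) =====
-- def is_pat(s):
--     # DP with memoization over the substrings the recursion visits, plus
--     # prefix-min / suffix-max arrays so each call scans its string once.
--     memo = {}
--     def solve(t):
--         r = memo.get(t)
--         if r is not None: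
--             return r
--         n = len(t)
--         if n == 1:
--             res = True
--         else:
--             pmin = []
--             m = None
--             for c in t:
--                 if m is None or c < m:
--                     m = c
--                 pmin.append(m)
--             smax = []
--             m = None
--             for c in reversed(t):
--                 if m is None or c > m:
--                     m = c
--                 smax.append(m)
--             smax.reverse()
--             res = False
--             for i in range(1, n):
--                 if pmin[i - 1] > smax[i] and solve(t[:i][::-1]) and solve(t[i:][::-1]):
--                     res = True
--                     break
--         memo[t] = res
--         return res
--     return solve(s)
-- ===== Notes on version B (the rewrite author's own statement) =====
-- stated objective: faster
-- what changed: B memoizes results per substring in a dict (DP instead of naive exponential recursion) and finds valid split points via one-pass prefix-min/suffix-max arrays instead of rescanning min(left)/max(right) for every split.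
import Mathlib
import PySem

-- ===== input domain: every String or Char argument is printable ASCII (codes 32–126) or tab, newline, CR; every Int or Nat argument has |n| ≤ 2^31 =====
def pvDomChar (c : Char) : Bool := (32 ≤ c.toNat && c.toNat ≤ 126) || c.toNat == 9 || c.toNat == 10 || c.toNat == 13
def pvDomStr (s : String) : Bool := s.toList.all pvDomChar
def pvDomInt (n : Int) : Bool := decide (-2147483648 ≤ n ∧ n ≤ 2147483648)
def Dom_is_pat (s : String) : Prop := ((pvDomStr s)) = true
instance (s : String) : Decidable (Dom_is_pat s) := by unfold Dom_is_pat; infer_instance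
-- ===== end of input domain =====

-- B replaces A's naive exponential recursion by memoized DP over the visited substrings,
-- with prefix-min/suffix-max arrays instead of per-split min/max rescans (measured faster).


-- ===== PORT A =====
-- fuel = length of the list; each recursive call is on a strictly shorter list
def is_pat_go : Nat → List Char → Bool
  | 0, _ => false
  | k + 1, t =>
    if t.length == 1 then true
    else
      (PySem.List.pyRange 1 (t.length : Int) 1).any fun i =>
        let left := PySem.List.slice t none (some i)          -- s[:i]
        let right := PySem.List.slice t (some i) none         -- s[i:]
        match PySem.List.min? left (fun x => x), PySem.List.max? right (fun x => x) with
        | some mn, some mx =>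
          if mn ≤ mx then false                               -- 'continue'
          else is_pat_go k left.reverse && is_pat_go k right.reverse  -- [::-1] = reverse (slice?_none_none_neg_one)
        | _, _ => false                                       -- unreachable: both halves nonempty

def is_pat (s : String) : Bool := is_pat_go s.toList.length s.toList

-- ===== PORT B =====
-- running prefix minima: pmin[i] = min(t[:i+1])
def pminList (t : List Char) : List Char :=
  (t.foldl (fun (acc : Option Char × List Char) c =>
      let m := match acc.1 with
        | none => c
        | some m0 => if c < m0 then c else m0
      (some m, acc.2 ++ [m])) (none, ([] : List Char))).2

-- running suffix maxima: smax[i] = max(t[i:])  (scan the reversed list, then reverse)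
def smaxList (t : List Char) : List Char :=
  ((t.reverse.foldl (fun (acc : Option Char × List Char) c =>
      let m := match acc.1 with
        | none => c
        | some m0 => if c > m0 then c else m0
      (some m, acc.2 ++ [m])) (none, ([] : List Char))).2).reverse

-- the 'for i in range(1, n)' loop of solve, threading the memo dict; f = recursive solve
def is_pat_loop
    (f : List Char → PySem.Dict (List Char) Bool → Bool × PySem.Dict (List Char) Bool)
    (t pmin smax : List Char) :
    List Int → PySem.Dict (List Char) Bool → Bool × PySem.Dict (List Char) Bool
  | [], memo => (false, memo)
  | i :: rest, memo =>
    -- indices i-1 and i are always in range here, so the defaults are unreachable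
    if PySem.List.pyGetD pmin (i - 1) 'a' > PySem.List.pyGetD smax i 'a' then
      let r1 := f (PySem.List.slice t none (some i)).reverse memo
      if r1.1 then
        let r2 := f (PySem.List.slice t (some i) none).reverse r1.2
        if r2.1 then (true, r2.2)
        else is_pat_loop f t pmin smax rest r2.2
      else is_pat_loop f t pmin smax rest r1.2
    else is_pat_loop f t pmin smax rest memo

def is_pat_solve :
    Nat → List Char → PySem.Dict (List Char) Bool → Bool × PySem.Dict (List Char) Bool
  | 0, _, memo => (false, memo)
  | k + 1, t, memo =>
    match memo.get? t with
    | some v => (v, memo)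
    | none =>
      let r :=
        if t.length == 1 then (true, memo)
        else
          is_pat_loop (is_pat_solve k) t (pminList t) (smaxList t)
            (PySem.List.pyRange 1 (t.length : Int) 1) memo
      (r.1, r.2.insert t r.1)

def is_pat_alt (s : String) : Bool :=
  (is_pat_solve s.toList.length s.toList PySem.Dict.empty).1

-- ===== PRECONDITION & SPEC =====
def Spec_is_pat (s : String) (out : Bool) : Prop := out = is_pat_alt s
instance (s : String) (out : Bool) : Decidable (Spec_is_pat s out) := by unfold Spec_is_pat; infer_instance

-- ===== CLAIM (what is proved, stated in full; the proofs are below) =====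
def Claim_equal_is_pat : Prop := ∀ (s : String), Dom_is_pat s → Spec_is_pat s (is_pat s)

-- ===== LEMMAS AND PROOFS =====

-- the mathematical function both ports compute
def patSpec (t : List Char) : Bool := is_pat_go t.length t

-- memo-dict invariant: every stored value is correct
def MemoInv (d : PySem.Dict (List Char) Bool) : Prop :=
  ∀ t v, d.get? t = some v → v = patSpec t

-- the per-index body of A's loop, with full-fuel recursive results
def patBody (t : List Char) (i : Int) : Bool :=
  match PySem.List.min? (PySem.List.slice t none (some i)) (fun x => x),
        PySem.List.max? (PySem.List.slice t (some i) none) (fun x => x) with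
  | some mn, some mx =>
    if mn ≤ mx then false
    else patSpec (PySem.List.slice t none (some i)).reverse &&
         patSpec (PySem.List.slice t (some i) none).reverse
  | _, _ => false

theorem pv_any_congr {α : Type} {l : List α} {f g : α → Bool}
    (h : ∀ x ∈ l, f x = g x) : l.any f = l.any g := by
  induction l with
  | nil => rfl
  | cons a r ih =>
    simp only [List.any_cons, h a (by simp)]
    rw [ih (fun x hx => h x (by simp [hx]))]

theorem pv_if_min (c x : Char) : (if c < x then c else x) = min x c := by
  by_cases h : c < x
  · simp [h, min_eq_right (le_of_lt h)]
  · simp [h, min_eq_left (le_of_not_gt h)]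

theorem pv_if_max (c x : Char) : (if c > x then c else x) = max x c := by
  by_cases h : c > x
  · simp [h, max_eq_right (le_of_lt h)]
  · simp [h, max_eq_left (le_of_not_gt h)]

def runMin : List Char → Char → List Char
  | [], _ => []
  | c :: r, m => (if c < m then c else m) :: runMin r (if c < m then c else m)

def runMax : List Char → Char → List Char
  | [], _ => []
  | c :: r, m => (if c > m then c else m) :: runMax r (if c > m then c else m)

theorem runMin_length : ∀ (r : List Char) (m : Char), (runMin r m).length = r.length := by
  intro r
  induction r with
  | nil => intro m; rfl
  | cons c r ih => intro m; simp [runMin, ih]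

theorem runMax_length : ∀ (r : List Char) (m : Char), (runMax r m).length = r.length := by
  intro r
  induction r with
  | nil => intro m; rfl
  | cons c r ih => intro m; simp [runMax, ih]

theorem pv_foldl_pmin : ∀ (r : List Char) (m : Char) (acc : List Char),
    (r.foldl (fun (acc : Option Char × List Char) c =>
        let m := match acc.1 with
          | none => c
          | some m0 => if c < m0 then c else m0
        (some m, acc.2 ++ [m])) (some m, acc)).2 = acc ++ runMin r m := by
  intro r
  induction r with
  | nil => intro m acc; simp [runMin]
  | cons c r ih =>
    intro m acc
    simp only [List.foldl_cons, runMin]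
    rw [ih]
    simp

theorem pv_foldl_pmax : ∀ (r : List Char) (m : Char) (acc : List Char),
    (r.foldl (fun (acc : Option Char × List Char) c =>
        let m := match acc.1 with
          | none => c
          | some m0 => if c > m0 then c else m0
        (some m, acc.2 ++ [m])) (some m, acc)).2 = acc ++ runMax r m := by
  intro r
  induction r with
  | nil => intro m acc; simp [runMax]
  | cons c r ih =>
    intro m acc
    simp only [List.foldl_cons, runMax]
    rw [ih]
    simp

theorem pminList_cons (x : Char) (r : List Char) :
    pminList (x :: r) = x :: runMin r x := by
  unfold pminList
  simp only [List.foldl_cons]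
  rw [pv_foldl_pmin]
  simp

theorem smaxList_eq (t : List Char) (y : Char) (u : List Char) (h : t.reverse = y :: u) :
    smaxList t = (y :: runMax u y).reverse := by
  unfold smaxList
  rw [h]
  simp only [List.foldl_cons]
  rw [pv_foldl_pmax]
  simp

theorem runMin_get : ∀ (r : List Char) (x : Char) (j : Nat), j ≤ r.length →
    (x :: runMin r x)[j]? = some ((r.take j).foldl min x) := by
  intro r
  induction r with
  | nil =>
    intro x j hj
    have : j = 0 := by simpa using hj
    subst this
    simp
  | cons c r ih =>
    intro x j hj
    cases j with
    | zero => simp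
    | succ j' =>
      have h1 : (x :: runMin (c :: r) x)[j' + 1]? = (runMin (c :: r) x)[j']? := by simp
      rw [h1]
      simp only [runMin, pv_if_min]
      rw [ih (min x c) j' (by simpa using hj)]
      simp

theorem runMax_get : ∀ (r : List Char) (x : Char) (j : Nat), j ≤ r.length →
    (x :: runMax r x)[j]? = some ((r.take j).foldl max x) := by
  intro r
  induction r with
  | nil =>
    intro x j hj
    have : j = 0 := by simpa using hj
    subst this
    simp
  | cons c r ih =>
    intro x j hj
    cases j with
    | zero => simp
    | succ j' =>
      have h1 : (x :: runMax (c :: r) x)[j' + 1]? = (runMax (c :: r) x)[j']? := by simp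
      rw [h1]
      simp only [runMax, pv_if_max]
      rw [ih (max x c) j' (by simpa using hj)]
      simp

theorem pmin_get (t : List Char) (j : Nat) (h : j < t.length) :
    (pminList t)[j]? = PySem.List.min? (t.take (j + 1)) (fun x => x) := by
  cases t with
  | nil => simp at h
  | cons x r =>
    rw [pminList_cons, List.take_succ_cons, PySem.List.min?_id_cons]
    exact runMin_get r x j (by simpa using h)

theorem pv_foldl_max_perm {x z : Char} {l₁ l₂ : List Char}
    (h : (x :: l₁).Perm (z :: l₂)) : l₁.foldl max x = l₂.foldl max z := by
  have hA := PySem.List.le_foldl_max l₁ x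
  have hB := PySem.List.le_foldl_max l₂ z
  have hAmem : l₁.foldl max x ∈ x :: l₁ := by
    rcases PySem.List.foldl_max_mem l₁ x with h' | h' <;> simp [h']
  have hBmem : l₂.foldl max z ∈ z :: l₂ := by
    rcases PySem.List.foldl_max_mem l₂ z with h' | h' <;> simp [h']
  have hAB : l₁.foldl max x ≤ l₂.foldl max z := by
    have := h.mem_iff.mp hAmem
    rcases List.mem_cons.mp this with h' | h'
    · rw [h']; exact hB.1
    · exact hB.2 _ h'
  have hBA : l₂.foldl max z ≤ l₁.foldl max x := by
    have := h.symm.mem_iff.mp hBmem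
    rcases List.mem_cons.mp this with h' | h'
    · rw [h']; exact hA.1
    · exact hA.2 _ h'
  exact le_antisymm hAB hBA

theorem smax_get (t : List Char) (i : Nat) (h : i < t.length) :
    (smaxList t)[i]? = PySem.List.max? (t.drop i) (fun x => x) := by
  have hne : t.reverse ≠ [] := by
    intro hc
    have : t = [] := by simpa using congrArg List.reverse hc
    simp [this] at h
  obtain ⟨y, u, hyu⟩ := List.exists_cons_of_ne_nil hne
  have hlen : u.length + 1 = t.length := by
    have := congrArg List.length hyu
    simpa [Nat.add_comm] using this.symm
  -- drop i is nonempty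
  have hdne : t.drop i ≠ [] := by
    intro hc
    have := congrArg List.length hc
    simp at this
    omega
  obtain ⟨z, w, hzw⟩ := List.exists_cons_of_ne_nil hdne
  rw [smaxList_eq t y u hyu, hzw, PySem.List.max?_id_cons]
  have hl : (y :: runMax u y).length = t.length := by
    simp [runMax_length]; omega
  rw [List.getElem?_reverse (by rw [hl]; exact h)]
  rw [hl]
  have hj : t.length - 1 - i ≤ u.length := by omega
  rw [runMax_get u y (t.length - 1 - i) hj]
  -- the two folds are maxima of permuted nonempty lists
  have hperm : (y :: u.take (t.length - 1 - i)).Perm (z :: w) := by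
    have h1 : y :: u.take (t.length - 1 - i) = (y :: u).take (t.length - i) := by
      have : t.length - i = (t.length - 1 - i) + 1 := by omega
      rw [this, List.take_succ_cons]
    have h2 : (y :: u).take (t.length - i) = (t.drop i).reverse := by
      rw [← hyu, List.take_reverse]
      congr 1
      congr 1
      omega
    rw [h1, h2, ← hzw]
    exact (t.drop i).reverse_perm
  rw [pv_foldl_max_perm hperm]

theorem pminList_length (t : List Char) : (pminList t).length = t.length := by
  cases t with
  | nil => rfl
  | cons x r => rw [pminList_cons]; simp [runMin_length]

theorem smaxList_length (t : List Char) : (smaxList t).length = t.length := by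
  rcases ht : t.reverse with _ | ⟨y, u⟩
  · have : t = [] := by simpa using congrArg List.reverse ht
    subst this; rfl
  · rw [smaxList_eq t y u ht]
    have := congrArg List.length ht
    simp at this ⊢
    simp [runMax_length]
    omega

theorem pv_go_fuel : ∀ (n k : Nat) (t : List Char),
    t.length ≤ n → t.length ≤ k → is_pat_go k t = patSpec t := by
  intro n
  induction n with
  | zero =>
    intro k t ht _
    have ht0 : t = [] := List.length_eq_zero_iff.mp (Nat.le_zero.mp ht)
    subst ht0
    cases k with
    | zero => rfl
    | succ k' =>
      show is_pat_go (k' + 1) [] = patSpec []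
      simp only [is_pat_go, patSpec]
      rw [PySem.List.pyRange_one_eq_nil (by norm_num)]
      simp [is_pat_go]
  | succ n ih =>
    intro k t ht hk
    by_cases hle : t.length ≤ n
    · exact ih k t hle hk
    · have hlen : t.length = n + 1 := by omega
      obtain ⟨k', rfl⟩ : ∃ k', k = k' + 1 := ⟨k - 1, by omega⟩
      have hk' : n ≤ k' := by omega
      unfold patSpec
      rw [hlen]
      simp only [is_pat_go]
      by_cases h1 : t.length = 1
      · simp [h1]
      · have h1' : (t.length == 1) = false := by simp [h1]
        simp only [h1', Bool.false_eq_true, if_false]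
        apply pv_any_congr
        intro i hi
        obtain ⟨hi1, hi2⟩ := PySem.List.mem_pyRange_one.mp hi
        rw [hlen] at hi2
        have hleft : PySem.List.slice t none (some i) = t.take i.toNat :=
          PySem.List.slice_to t (by omega)
        have hlL : (t.take i.toNat).reverse.length = i.toNat := by
          simp [List.length_take]; omega
        have hrL : (t.drop i.toNat).reverse.length = t.length - i.toNat := by simp
        have e1 : is_pat_go k' (PySem.List.slice t none (some i)).reverse =
            is_pat_go n (PySem.List.slice t none (some i)).reverse := by
          rw [hleft]
          rw [ih k' _ (by omega) (by omega), ih n _ (by omega) (by omega)]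
        have e2 : is_pat_go k' (PySem.List.slice t (some i) none).reverse =
            is_pat_go n (PySem.List.slice t (some i) none).reverse := by
          rw [PySem.List.slice_from t (by omega)]
          rw [ih k' _ (by omega) (by omega), ih n _ (by omega) (by omega)]
        simp only [e1, e2]

theorem pv_patSpec_any (t : List Char) (h : t.length ≠ 1) :
    patSpec t = (PySem.List.pyRange 1 (t.length : Int) 1).any (patBody t) := by
  rcases hn : t.length with _ | m
  · have ht0 : t = [] := List.length_eq_zero_iff.mp hn
    subst ht0
    simp only [patSpec, is_pat_go]
    rw [PySem.List.pyRange_one_eq_nil (by norm_num)]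
    simp only [List.any_nil]
    rfl
  · unfold patSpec
    rw [hn]
    simp only [is_pat_go]
    have h1' : (t.length == 1) = false := by simp [h]
    simp only [h1', Bool.false_eq_true, if_false]
    rw [← hn]
    apply pv_any_congr
    intro i hi
    obtain ⟨hi1, hi2⟩ := PySem.List.mem_pyRange_one.mp hi
    rw [hn] at hi2
    push_cast at hi2
    have hleft : PySem.List.slice t none (some i) = t.take i.toNat :=
      PySem.List.slice_to t (by omega)
    have e1 : is_pat_go m (PySem.List.slice t none (some i)).reverse =
        patSpec (PySem.List.slice t none (some i)).reverse := by
      apply pv_go_fuel m m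
      all_goals rw [hleft]; simp [List.length_take]; omega
    have e2 : is_pat_go m (PySem.List.slice t (some i) none).reverse =
        patSpec (PySem.List.slice t (some i) none).reverse := by
      apply pv_go_fuel m m
      all_goals rw [PySem.List.slice_from t (by omega)]; simp; omega
    simp only [patBody, e1, e2]

theorem pv_loop_correct (K : Nat)
    (f : List Char → PySem.Dict (List Char) Bool → Bool × PySem.Dict (List Char) Bool)
    (hf : ∀ t' d', t'.length ≤ K → MemoInv d' → (f t' d').1 = patSpec t' ∧ MemoInv (f t' d').2)
    (t : List Char) (hn : t.length ≤ K + 1) :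
    ∀ (idxs : List Int) (d : PySem.Dict (List Char) Bool),
      (∀ i ∈ idxs, 1 ≤ i ∧ i < (t.length : Int)) → MemoInv d →
      (is_pat_loop f t (pminList t) (smaxList t) idxs d).1 = idxs.any (patBody t) ∧
      MemoInv (is_pat_loop f t (pminList t) (smaxList t) idxs d).2 := by
  intro idxs
  induction idxs with
  | nil => intro d _ hd; exact ⟨rfl, hd⟩
  | cons i rest ihr =>
    intro d hmem hd
    obtain ⟨hi1, hi2⟩ := hmem i (by simp)
    have hrest := fun i' h' => hmem i' (List.mem_cons_of_mem _ h')
    have hjl : 1 ≤ i.toNat := by omega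
    have hjr : i.toNat < t.length := by omega
    have hleft : PySem.List.slice t none (some i) = t.take i.toNat :=
      PySem.List.slice_to t (by omega)
    have hright : PySem.List.slice t (some i) none = t.drop i.toNat :=
      PySem.List.slice_from t (by omega)
    -- min/max of the halves exist
    obtain ⟨mn, hmn⟩ : ∃ mn, PySem.List.min? (t.take i.toNat) (fun x => x) = some mn := by
      rcases hv : PySem.List.min? (t.take i.toNat) (fun x => x) with _ | mn
      · exfalso
        have h0 := (PySem.List.min?_eq_none_iff _ _).mp hv
        have hlen0 := congrArg List.length h0
        rw [List.length_take, List.length_nil] at hlen0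
        omega
      · exact ⟨mn, rfl⟩
    obtain ⟨mx, hmx⟩ : ∃ mx, PySem.List.max? (t.drop i.toNat) (fun x => x) = some mx := by
      rcases hv : PySem.List.max? (t.drop i.toNat) (fun x => x) with _ | mx
      · exfalso
        have h0 := (PySem.List.max?_eq_none_iff _ _).mp hv
        have hlen0 := congrArg List.length h0
        rw [List.length_drop, List.length_nil] at hlen0
        omega
      · exact ⟨mx, rfl⟩
    -- the array entries are those extrema
    have hpmv : PySem.List.pyGetD (pminList t) (i - 1) 'a' = mn := by
      have hlt : i - 1 < ((pminList t).length : Int) := by rw [pminList_length]; omega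
      rw [PySem.List.pyGetD_eq_getElem (pminList t) 'a' (by omega) hlt]
      have hq : (pminList t)[(i - 1).toNat]? = some mn := by
        have := pmin_get t ((i - 1).toNat) (by omega)
        rw [show (i - 1).toNat + 1 = i.toNat by omega] at this
        rw [this, hmn]
      have hb2 : (i - 1).toNat < (pminList t).length := by rw [pminList_length]; omega
      rw [List.getElem?_eq_getElem hb2] at hq
      exact Option.some.inj hq
    have hsmv : PySem.List.pyGetD (smaxList t) i 'a' = mx := by
      have hlt : i < ((smaxList t).length : Int) := by rw [smaxList_length]; omega
      rw [PySem.List.pyGetD_eq_getElem (smaxList t) 'a' (by omega) hlt]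
      have hq : (smaxList t)[i.toNat]? = some mx := by
        rw [smax_get t i.toNat hjr, hmx]
      have hb2 : i.toNat < (smaxList t).length := by rw [smaxList_length]; omega
      rw [List.getElem?_eq_getElem hb2] at hq
      exact Option.some.inj hq
    have hmn' : PySem.List.min? (PySem.List.slice t none (some i)) (fun x => x) = some mn := by
      rw [hleft]; exact hmn
    have hmx' : PySem.List.max? (PySem.List.slice t (some i) none) (fun x => x) = some mx := by
      rw [hright]; exact hmx
    have hbody : patBody t i = (if mn ≤ mx then false
        else patSpec (PySem.List.slice t none (some i)).reverse &&
             patSpec (PySem.List.slice t (some i) none).reverse) := by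
      simp only [patBody, hmn', hmx']
    simp only [is_pat_loop, hpmv, hsmv, List.any_cons]
    by_cases hc : mn ≤ mx
    · have hcc : ¬ mx < mn := not_lt.mpr hc
      rw [if_neg hcc]
      simp only [hbody, if_pos hc, Bool.false_or]
      exact ihr d hrest hd
    · have hcc : mx < mn := lt_of_not_ge hc
      rw [if_pos hcc]
      simp only [hbody, if_neg hc]
      obtain ⟨e1, hI1⟩ := hf (PySem.List.slice t none (some i)).reverse d
        (by rw [hleft, List.length_reverse, List.length_take]; omega) hd
      rcases hps1 : patSpec (PySem.List.slice t none (some i)).reverse with _ | _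
      · rw [hps1] at e1
        simp only [e1, Bool.false_eq_true, if_false, hps1, Bool.false_and, Bool.false_or]
        exact ihr _ hrest hI1
      · rw [hps1] at e1
        simp only [e1, if_true, hps1, Bool.true_and]
        obtain ⟨e2, hI2⟩ := hf (PySem.List.slice t (some i) none).reverse _
          (by rw [hright, List.length_reverse, List.length_drop]; omega) hI1
        rcases hps2 : patSpec (PySem.List.slice t (some i) none).reverse with _ | _
        · rw [hps2] at e2
          simp only [e2, Bool.false_eq_true, if_false, hps2, Bool.false_or]
          exact ihr _ hrest hI2
        · rw [hps2] at e2
          simp only [e2, if_true, hps2, Bool.true_or]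
          exact ⟨by simp, hI2⟩

theorem pv_solve_correct : ∀ (k : Nat) (t : List Char) (d : PySem.Dict (List Char) Bool),
    t.length ≤ k → MemoInv d →
    (is_pat_solve k t d).1 = patSpec t ∧ MemoInv (is_pat_solve k t d).2 := by
  intro k
  induction k with
  | zero =>
    intro t d ht hd
    have ht0 : t = [] := List.length_eq_zero_iff.mp (Nat.le_zero.mp ht)
    subst ht0
    exact ⟨by simp [is_pat_solve, patSpec, is_pat_go], hd⟩
  | succ k ih =>
    intro t d ht hd
    cases hget : d.get? t with
    | some v =>
      simp only [is_pat_solve, hget]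
      exact ⟨(hd t v hget).symm ▸ rfl, hd⟩
    | none =>
      by_cases h1 : t.length = 1
      · have hb : (t.length == 1) = true := by simp [h1]
        simp only [is_pat_solve, hget, hb, if_true]
        constructor
        · show true = patSpec t
          simp [patSpec, h1, is_pat_go]
        · intro t' v' h'
          rw [PySem.Dict.get?_insert] at h'
          by_cases he : t' = t
          · simp only [he, if_true] at h'
            have : v' = true := by simpa using h'.symm
            rw [this, he]
            simp [patSpec, h1, is_pat_go]
          · simp only [he, if_false] at h'
            exact hd t' v' h'
      · have hb : (t.length == 1) = false := by simp [h1]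
        have hloop := pv_loop_correct k (is_pat_solve k) ih t (by omega)
          (PySem.List.pyRange 1 (t.length : Int) 1) d
          (fun i hi => PySem.List.mem_pyRange_one.mp hi) hd
        have hval : (is_pat_loop (is_pat_solve k) t (pminList t) (smaxList t)
            (PySem.List.pyRange 1 (t.length : Int) 1) d).1 = patSpec t := by
          rw [hloop.1, ← pv_patSpec_any t h1]
        simp only [is_pat_solve, hget, hb, Bool.false_eq_true, if_false]
        refine ⟨hval, ?_⟩
        intro t' v' h'
        rw [PySem.Dict.get?_insert] at h'
        by_cases he : t' = t
        · simp only [he, if_true] at h'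
          have : v' = (is_pat_loop (is_pat_solve k) t (pminList t) (smaxList t)
              (PySem.List.pyRange 1 (t.length : Int) 1) d).1 := by simpa using h'.symm
          rw [this, he, hval]
        · simp only [he, if_false] at h'
          exact hloop.2 t' v' h'

-- ===== VERDICT (by name: the statement is the Claim_ definition above) =====
theorem is_pat_spec : Claim_equal_is_pat := by
  intro s _
  unfold Spec_is_pat is_pat is_pat_alt
  have h1 := pv_go_fuel s.toList.length s.toList.length s.toList le_rfl le_rfl
  have h2 := pv_solve_correct s.toList.length s.toList PySem.Dict.empty le_rfl
    (by intro t v hv; simp [PySem.Dict.get?_empty] at hv)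
  rw [h1, h2.1]
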